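-- pv_equiv track=rewrite | github.com/MaxiCarranza/App_new | Sources/main.py | ordenar_jobs_creados_por_dependencias
-- ===== SOURCE A (Python) =====
-- from collections import defaultdict
--
-- def ordenar_jobs_creados_por_dependencias(dependencias, jobs_creados):
--     # Agrupar jobs creados por ODATE
--     jobs_por_odate = defaultdict(list)
--     for job_nuevo, job_original, odate in jobs_creados:
--         jobs_por_odate[odate].append((job_nuevo, job_original, odate))
--
--     jobs_creados_ordenados = []
--     usados = set()
--
--     # Recorrer cada ODATE y ordenar por dependencias
--     for odate, jobs_con_odate in sorted(jobs_por_odate.items()):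
--         # Ordenar por dependencias dentro del mismo ODATE
--         for dep in dependencias:
--             job_deja_marca, job_recibe_marca = dep
--
--             # Buscar el job correspondiente en jobs_con_odate
--             for job_nuevo, job_original, odate_actual in jobs_con_odate:
--                 if job_original == job_recibe_marca and job_nuevo not in usados and odate_actual == odate:
--                     jobs_creados_ordenados.append((job_nuevo, job_original, odate_actual))
--                     usados.add(job_nuevo)
--
--                     # Buscar el job que deja la marca (predecesor en la dependencia)
--                     for job_nuevo_predecesor, job_original_predecesor, odate_predecesor in jobs_con_odate:
--                         if job_original_predecesor == job_deja_marca and job_nuevo_predecesor not in usados: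
--                             jobs_creados_ordenados.append(
--                                 (job_nuevo_predecesor, job_original_predecesor, odate_predecesor))
--                             usados.add(job_nuevo_predecesor)
--                             break
--
--     # Agregar los jobs que no fueron procesados en las dependencias
--     for job_nuevo, job_original, odate in jobs_creados:
--         if job_nuevo not in usados:
--             jobs_creados_ordenados.append((job_nuevo, job_original, odate))
--             usados.add(job_nuevo)
--
--     return jobs_creados_ordenados
-- ===== SOURCE B (Python) =====
-- from collections import deque
--
--
-- def ordenar_jobs_creados_por_dependencias(dependencias, jobs_creados):
--     # Group created jobs by ODATE once.
--     grupos = {}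
--     for t in jobs_creados:
--         grupos.setdefault(t[2], []).append(t)
--
--     resultado = []
--     usados = set()
--
--     for odate in sorted(grupos):
--         # Index this ODATE's jobs by job_original, in order, as consumable queues.
--         indice = {}
--         for t in grupos[odate]:
--             indice.setdefault(t[1], deque()).append(t)
--
--         def tomar(orig):
--             # Pop and return the first not-yet-used job with this job_original.
--             cola = indice.get(orig)
--             if cola is None:
--                 return None
--             while cola and cola[0][0] in usados:
--                 cola.popleft()
--             if not cola:
--                 return None
--             return cola.popleft()
--
--         for deja, recibe in dependencias:
--             while True:
--                 j = tomar(recibe)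
--                 if j is None:
--                     break
--                 resultado.append(j)
--                 usados.add(j[0])
--                 p = tomar(deja)
--                 if p is not None:
--                     resultado.append(p)
--                     usados.add(p[0])
--
--     # Append the jobs never reached through a dependency, in input order.
--     for t in jobs_creados:
--         if t[0] not in usados:
--             resultado.append(t)
--             usados.add(t[0])
--     return resultado
-- ===== Notes on version B (the rewrite author's own statement) =====
-- stated objective: alternative
-- what changed: Instead of rescanning the whole ODATE group for every dependency (and rescanning again for each predecessor), B indexes each ODATE group by job_original into ordered queues and consumes them while skipping used entries, so no inner scan over the group remains.
import Mathlib
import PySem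

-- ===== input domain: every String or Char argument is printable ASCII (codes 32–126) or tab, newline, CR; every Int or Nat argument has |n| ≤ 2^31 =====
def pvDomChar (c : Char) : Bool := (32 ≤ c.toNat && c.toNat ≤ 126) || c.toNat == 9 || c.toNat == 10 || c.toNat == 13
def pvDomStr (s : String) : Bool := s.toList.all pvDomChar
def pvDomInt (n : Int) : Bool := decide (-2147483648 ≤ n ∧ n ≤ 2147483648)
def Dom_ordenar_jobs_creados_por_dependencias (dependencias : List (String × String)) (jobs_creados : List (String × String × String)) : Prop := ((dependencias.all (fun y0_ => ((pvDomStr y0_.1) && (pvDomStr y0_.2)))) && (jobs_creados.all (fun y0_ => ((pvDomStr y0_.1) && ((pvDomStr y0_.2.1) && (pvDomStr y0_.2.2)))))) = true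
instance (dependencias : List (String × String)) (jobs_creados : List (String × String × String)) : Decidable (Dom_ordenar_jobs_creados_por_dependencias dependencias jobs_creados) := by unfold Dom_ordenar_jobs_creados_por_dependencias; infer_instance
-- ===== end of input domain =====

-- B replaces A's per-dependency rescans of each ODATE group by per-ODATE queues indexed by
-- job_original that are consumed while skipping used entries (objective: alternative algorithm).

-- ===== PORT A =====
-- group jobs_creados by ODATE (defaultdict(list) + append)
def pvA_group (jobs_creados : List (String × String × String)) :
    PySem.Dict String (List (String × String × String)) :=
  jobs_creados.foldl (fun d e => d.modify e.2.2 [] (fun l => l ++ [e])) PySem.Dict.empty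

-- the innermost loop: first job in the group with job_original == deja not yet used ('break')
def pvA_pred (g : List (String × String × String)) (deja : String)
    (acc : List (String × String × String)) (us : PySem.Set String) :
    List (String × String × String) × PySem.Set String :=
  match g with
  | [] => (acc, us)
  | e :: rest =>
    if e.2.1 == deja && !(PySem.Set.contains us e.1) then
      (acc ++ [e], PySem.Set.add us e.1)
    else pvA_pred rest deja acc us

-- the middle loop: scan the group for receivers of one dependency
def pvA_scan (g : List (String × String × String)) (odate deja recibe : String)
    (r : List (String × String × String))
    (acc : List (String × String × String)) (us : PySem.Set String) :
    List (String × String × String) × PySem.Set String :=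
  match r with
  | [] => (acc, us)
  | e :: rest =>
    if e.2.1 == recibe && !(PySem.Set.contains us e.1) && e.2.2 == odate then
      let st := pvA_pred g deja (acc ++ [e]) (PySem.Set.add us e.1)
      pvA_scan g odate deja recibe rest st.1 st.2
    else pvA_scan g odate deja recibe rest acc us

def ordenar_jobs_creados_por_dependencias (dependencias : List (String × String)) (jobs_creados : List (String × String × String)) : List (String × String × String) :=
  let jobs_por_odate := pvA_group jobs_creados
  -- sorted(jobs_por_odate.items()): keys are distinct, so tuple comparison is comparison of the keys
  let st := (PySem.List.sorted jobs_por_odate.items (fun p => p.1) false).foldl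
    (fun (st : List (String × String × String) × PySem.Set String) item =>
      dependencias.foldl
        (fun st dep => pvA_scan item.2 item.1 dep.1 dep.2 item.2 st.1 st.2) st)
    ([], PySem.Set.empty)
  -- append the jobs not reached through the dependencies
  (jobs_creados.foldl
    (fun (st : List (String × String × String) × PySem.Set String) e =>
      if !(PySem.Set.contains st.2 e.1) then (st.1 ++ [e], PySem.Set.add st.2 e.1) else st)
    st).1

-- ===== PORT B =====
-- group jobs_creados by ODATE (setdefault + append)
def pvB_group (jobs_creados : List (String × String × String)) :
    PySem.Dict String (List (String × String × String)) :=
  jobs_creados.foldl (fun d e => d.modify e.2.2 [] (fun l => l ++ [e])) PySem.Dict.empty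

-- index one ODATE group by job_original (setdefault + append on deques)
def pvB_index (g : List (String × String × String)) :
    PySem.Dict String (List (String × String × String)) :=
  g.foldl (fun d e => d.modify e.2.1 [] (fun l => l ++ [e])) PySem.Dict.empty

-- tomar(orig): pop used entries off the front of the queue, then pop & return the first unused one
def pvB_tomar (d : PySem.Dict String (List (String × String × String)))
    (us : PySem.Set String) (o : String) :
    Option (String × String × String) × PySem.Dict String (List (String × String × String)) :=
  match d.get? o with
  | none => (none, d)
  | some cola =>
    match cola.dropWhile (fun e => PySem.Set.contains us e.1) with
    | [] => (none, d.insert o [])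
    | e :: rest => (some e, d.insert o rest)

-- termination helpers for the while-loop below (cited in decreasing_by)
theorem pvB_tomar_len_le (d : PySem.Dict String (List (String × String × String)))
    (us : PySem.Set String) (o k : String) :
    ((pvB_tomar d us o).2.getD k []).length ≤ (d.getD k []).length := by
  unfold pvB_tomar
  cases hg : d.get? o with
  | none => simp
  | some cola =>
    have hcd : d.getD o [] = cola := by rw [PySem.Dict.getD_eq_get?_getD, hg]; rfl
    cases hdw : cola.dropWhile (fun e => PySem.Set.contains us e.1) with
    | nil =>
      simp only [hdw]
      rw [PySem.Dict.getD_insert]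
      split_ifs with h
      · subst h; simp
      · exact le_rfl
    | cons e rest =>
      simp only [hdw]
      rw [PySem.Dict.getD_insert]
      split_ifs with h
      · subst h; rw [hcd]
        have h1 : rest.length < (cola.dropWhile (fun e => PySem.Set.contains us e.1)).length := by
          rw [hdw]; simp
        have h2 := List.length_dropWhile_le (p := fun e => PySem.Set.contains us e.1) (l := cola)
        omega
      · exact le_rfl

theorem pvB_tomar_len_lt (d : PySem.Dict String (List (String × String × String)))
    (us : PySem.Set String) (o : String) (e : String × String × String)
    (d' : PySem.Dict String (List (String × String × String)))
    (h : pvB_tomar d us o = (some e, d')) :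
    (d'.getD o []).length < (d.getD o []).length := by
  unfold pvB_tomar at h
  cases hg : d.get? o with
  | none => rw [hg] at h; simp at h
  | some cola =>
    rw [hg] at h; simp only at h
    have hcd : d.getD o [] = cola := by rw [PySem.Dict.getD_eq_get?_getD, hg]; rfl
    cases hdw : cola.dropWhile (fun e => PySem.Set.contains us e.1) with
    | nil => rw [hdw] at h; simp at h
    | cons e' rest =>
      rw [hdw] at h
      simp only [Prod.mk.injEq, Option.some.injEq] at h
      obtain ⟨he, hd⟩ := h
      subst hd
      rw [PySem.Dict.getD_insert, if_pos rfl, hcd]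
      have h1 : rest.length < (cola.dropWhile (fun e => PySem.Set.contains us e.1)).length := by
        rw [hdw]; simp
      have h2 := List.length_dropWhile_le (p := fun e => PySem.Set.contains us e.1) (l := cola)
      omega

-- the while-loop for one dependency
def pvB_dep (deja recibe : String)
    (acc : List (String × String × String)) (us : PySem.Set String)
    (d : PySem.Dict String (List (String × String × String))) :
    List (String × String × String) × PySem.Set String ×
      PySem.Dict String (List (String × String × String)) :=
  match h1 : pvB_tomar d us recibe with
  | (none, d1) => (acc, us, d1)
  | (some j, d1) =>
    match h2 : pvB_tomar d1 (PySem.Set.add us j.1) deja with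
    | (none, d2) => pvB_dep deja recibe (acc ++ [j]) (PySem.Set.add us j.1) d2
    | (some p, d2) =>
      pvB_dep deja recibe (acc ++ [j] ++ [p])
        (PySem.Set.add (PySem.Set.add us j.1) p.1) d2
termination_by (d.getD recibe []).length
decreasing_by
  · have ha := pvB_tomar_len_lt d us recibe j d1 h1
    have hb := pvB_tomar_len_le d1 (PySem.Set.add us j.1) deja recibe
    rw [h2] at hb; simp only at hb; omega
  · have ha := pvB_tomar_len_lt d us recibe j d1 h1
    have hb := pvB_tomar_len_le d1 (PySem.Set.add us j.1) deja recibe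
    rw [h2] at hb; simp only at hb; omega

def ordenar_jobs_creados_por_dependencias_alt (dependencias : List (String × String)) (jobs_creados : List (String × String × String)) : List (String × String × String) :=
  let grupos := pvB_group jobs_creados
  let st := (PySem.List.sorted grupos.keys (fun k => k) false).foldl
    (fun (st : List (String × String × String) × PySem.Set String) odate =>
      let r := dependencias.foldl
        (fun (s : List (String × String × String) × PySem.Set String ×
                PySem.Dict String (List (String × String × String))) dep =>
          pvB_dep dep.1 dep.2 s.1 s.2.1 s.2.2)
        (st.1, st.2, pvB_index (grupos.getD odate []))
      (r.1, r.2.1))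
    ([], PySem.Set.empty)
  (jobs_creados.foldl
    (fun (st : List (String × String × String) × PySem.Set String) e =>
      if !(PySem.Set.contains st.2 e.1) then (st.1 ++ [e], PySem.Set.add st.2 e.1) else st)
    st).1

-- ===== PRECONDITION & SPEC =====
def Spec_ordenar_jobs_creados_por_dependencias (dependencias : List (String × String)) (jobs_creados : List (String × String × String)) (out : List (String × String × String)) : Prop := out = ordenar_jobs_creados_por_dependencias_alt dependencias jobs_creados
instance (dependencias : List (String × String)) (jobs_creados : List (String × String × String)) (out : List (String × String × String)) : Decidable (Spec_ordenar_jobs_creados_por_dependencias dependencias jobs_creados out) := by unfold Spec_ordenar_jobs_creados_por_dependencias; infer_instance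

-- ===== CLAIM (what is proved, stated in full; the proofs are below) =====
def Claim_equal_ordenar_jobs_creados_por_dependencias : Prop := ∀ (dependencias : List (String × String)) (jobs_creados : List (String × String × String)), Dom_ordenar_jobs_creados_por_dependencias dependencias jobs_creados → Spec_ordenar_jobs_creados_por_dependencias dependencias jobs_creados (ordenar_jobs_creados_por_dependencias dependencias jobs_creados)

-- ===== LEMMAS AND PROOFS =====

-- growth of the used set
def pvSub (us us' : PySem.Set String) : Prop :=
  ∀ x : String, PySem.Set.contains us x = true → PySem.Set.contains us' x = true

theorem pvSub_refl (us : PySem.Set String) : pvSub us us := fun _ h => h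

theorem pvSub_trans {a b c : PySem.Set String} (h1 : pvSub a b) (h2 : pvSub b c) : pvSub a c :=
  fun x h => h2 x (h1 x h)

theorem pvSet_contains_add (us : PySem.Set String) (x y : String)
    (h : PySem.Set.contains us y = true) :
    PySem.Set.contains (PySem.Set.add us x) y = true := by
  simp only [PySem.Set.contains_iff] at h ⊢
  exact (PySem.Set.mem_add us x y).mpr (Or.inl h)

theorem pvSet_contains_add_self (us : PySem.Set String) (x : String) :
    PySem.Set.contains (PySem.Set.add us x) x = true := by
  simp only [PySem.Set.contains_iff]
  exact (PySem.Set.mem_add us x x).mpr (Or.inr rfl)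

theorem pvSub_add (us : PySem.Set String) (x : String) : pvSub us (PySem.Set.add us x) :=
  fun y h => pvSet_contains_add us x y h

-- the invariant tying B's per-original queues to the group list
def pvINV (g : List (String × String × String)) (us : PySem.Set String)
    (d : PySem.Dict String (List (String × String × String))) : Prop :=
  ∀ o : String, ∃ p, g.filter (fun e => e.2.1 == o) = p ++ d.getD o [] ∧
    ∀ e ∈ p, PySem.Set.contains us e.1 = true

theorem pvINV_mono {g : List (String × String × String)} {us us' : PySem.Set String}
    {d : PySem.Dict String (List (String × String × String))}
    (hsub : pvSub us us') (h : pvINV g us d) : pvINV g us' d := by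
  intro o
  obtain ⟨p, h1, h2⟩ := h o
  exact ⟨p, h1, fun e he => hsub _ (h2 e he)⟩

-- A's linear search over the group = head of B's queue after skipping used entries
theorem pvFind_decomp (g p s : List (String × String × String))
    (us : PySem.Set String) (o : String)
    (hsp : g.filter (fun e => e.2.1 == o) = p ++ s)
    (hpu : ∀ e ∈ p, PySem.Set.contains us e.1 = true) :
    g.find? (fun e => e.2.1 == o && !(PySem.Set.contains us e.1)) =
      (s.dropWhile (fun e => PySem.Set.contains us e.1)).head? := by
  have h1 : g.find? (fun e => e.2.1 == o && !(PySem.Set.contains us e.1)) =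
      (g.filter (fun e => e.2.1 == o)).find? (fun e => !(PySem.Set.contains us e.1)) := by
    rw [List.find?_filter]
    congr 1
    funext e
    by_cases hh : e.2.1 = o <;> simp [hh]
  rw [h1, hsp, List.find?_append]
  have hnone : p.find? (fun e => !(PySem.Set.contains us e.1)) = none := by
    rw [List.find?_eq_none]
    intro x hx
    have hmem : x.1 ∈ us := by simpa using hpu x hx
    simp [hmem]
  rw [hnone, Option.none_or]
  cases hdw : s.dropWhile (fun e => PySem.Set.contains us e.1) with
  | nil =>
    have hs : s = s.takeWhile (fun e => PySem.Set.contains us e.1) := by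
      conv_lhs => rw [← List.takeWhile_append_dropWhile
        (p := fun e => PySem.Set.contains us e.1) (l := s)]
      rw [hdw, List.append_nil]
    rw [List.find?_eq_none.mpr ?_]
    · rfl
    · intro x hx
      rw [hs] at hx
      have hmem : x.1 ∈ us := by simpa using List.mem_takeWhile_imp hx
      simp [hmem]
  | cons e rest =>
    have hsplit : s = s.takeWhile (fun e => PySem.Set.contains us e.1) ++ e :: rest := by
      conv_lhs => rw [← List.takeWhile_append_dropWhile
        (p := fun e => PySem.Set.contains us e.1) (l := s)]
      rw [hdw]
    have he : PySem.Set.contains us e.1 = false := by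
      have h := List.head?_dropWhile_not (fun e => PySem.Set.contains us e.1) s
      rw [hdw] at h
      simpa using h
    rw [show s.find? (fun e => !(PySem.Set.contains us e.1)) =
        (s.takeWhile (fun e => PySem.Set.contains us e.1) ++ e :: rest).find?
          (fun e => !(PySem.Set.contains us e.1)) from by rw [← hsplit]]
    rw [List.find?_append]
    have hne : e.1 ∉ us := by simpa using he
    rw [List.find?_eq_none.mpr ?_]
    · rw [Option.none_or, List.find?_cons_of_pos (by simp [hne]), List.head?_cons]
    · intro x hx
      have hmem : x.1 ∈ us := by simpa using List.mem_takeWhile_imp hx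
      simp [hmem]

-- everything in a queue that dropWhile consumed entirely is used
theorem pvAll_used_of_dropWhile_nil (s : List (String × String × String))
    (us : PySem.Set String)
    (hdw : s.dropWhile (fun e => PySem.Set.contains us e.1) = []) :
    ∀ y ∈ s, PySem.Set.contains us y.1 = true := by
  intro y hy
  have hs : s = s.takeWhile (fun e => PySem.Set.contains us e.1) := by
    conv_lhs => rw [← List.takeWhile_append_dropWhile
      (p := fun e => PySem.Set.contains us e.1) (l := s)]
    rw [hdw, List.append_nil]
  rw [hs] at hy
  exact List.mem_takeWhile_imp (p := fun (e : String × String × String) => PySem.Set.contains us e.1) hy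

-- what one call of tomar returns and what it leaves behind
theorem pvB_tomar_spec (g : List (String × String × String)) (us : PySem.Set String)
    (d : PySem.Dict String (List (String × String × String))) (o : String)
    (hinv : pvINV g us d) :
    (pvB_tomar d us o).1 = g.find? (fun e => e.2.1 == o && !(PySem.Set.contains us e.1)) ∧
    ∀ us', pvSub us us' →
      (∀ e, (pvB_tomar d us o).1 = some e → PySem.Set.contains us' e.1 = true) →
      pvINV g us' (pvB_tomar d us o).2 := by
  obtain ⟨p, hsp, hpu⟩ := hinv o
  have hfind := pvFind_decomp g p (d.getD o []) us o hsp hpu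
  unfold pvB_tomar
  cases hg : d.get? o with
  | none =>
    have hgd : d.getD o [] = [] := by rw [PySem.Dict.getD_eq_get?_getD, hg]; rfl
    rw [hgd] at hfind
    constructor
    · simpa using hfind.symm
    · intro us' hsub _
      exact pvINV_mono hsub hinv
  | some cola =>
    have hgd : d.getD o [] = cola := by rw [PySem.Dict.getD_eq_get?_getD, hg]; rfl
    rw [hgd] at hfind hsp
    cases hdw : cola.dropWhile (fun e => PySem.Set.contains us e.1) with
    | nil =>
      rw [hdw] at hfind
      simp only [hdw]
      refine ⟨by simpa using hfind.symm, ?_⟩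
      intro us' hsub _ k
      by_cases hk : k = o
      · subst hk
        refine ⟨p ++ cola, ?_, ?_⟩
        · rw [hsp, PySem.Dict.getD_insert, if_pos rfl, List.append_nil]
        · intro x hx
          rcases List.mem_append.mp hx with h | h
          · exact hsub _ (hpu x h)
          · exact hsub _ (pvAll_used_of_dropWhile_nil cola us hdw x h)
      · obtain ⟨q, hq1, hq2⟩ := hinv k
        refine ⟨q, ?_, fun x hx => hsub _ (hq2 x hx)⟩
        rw [PySem.Dict.getD_insert, if_neg hk]
        exact hq1
    | cons e rest =>
      rw [hdw] at hfind
      simp only [hdw]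
      refine ⟨by simpa using hfind.symm, ?_⟩
      intro us' hsub hcon
      have hce : PySem.Set.contains us' e.1 = true := hcon e rfl
      intro k
      by_cases hk : k = o
      · subst hk
        have hcola : cola = cola.takeWhile (fun e => PySem.Set.contains us e.1) ++ e :: rest := by
          conv_lhs => rw [← List.takeWhile_append_dropWhile
            (p := fun e => PySem.Set.contains us e.1) (l := cola)]
          rw [hdw]
        refine ⟨p ++ cola.takeWhile (fun e => PySem.Set.contains us e.1) ++ [e], ?_, ?_⟩
        · rw [hsp, PySem.Dict.getD_insert, if_pos rfl]
          conv_lhs => rw [hcola]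
          simp
        · intro x hx
          rcases List.mem_append.mp hx with h | h
          · rcases List.mem_append.mp h with h' | h'
            · exact hsub _ (hpu x h')
            · exact hsub _ (List.mem_takeWhile_imp (p := fun (e : String × String × String) => PySem.Set.contains us e.1) h')
          · rw [List.mem_singleton] at h
            subst h
            exact hce
      · obtain ⟨q, hq1, hq2⟩ := hinv k
        refine ⟨q, ?_, fun x hx => hsub _ (hq2 x hx)⟩
        rw [PySem.Dict.getD_insert, if_neg hk]
        exact hq1

-- A's predecessor loop is a find?
theorem pvA_pred_eq (deja : String) :
    ∀ (g acc : List (String × String × String)) (us : PySem.Set String),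
    pvA_pred g deja acc us =
      match g.find? (fun e => e.2.1 == deja && !(PySem.Set.contains us e.1)) with
      | none => (acc, us)
      | some e => (acc ++ [e], PySem.Set.add us e.1) := by
  intro g
  induction g with
  | nil => intro acc us; rfl
  | cons e rest ih =>
    intro acc us
    by_cases h : (e.2.1 == deja && !(PySem.Set.contains us e.1)) = true
    · rw [List.find?_cons_of_pos (p := fun (x : String × String × String) => x.2.1 == deja && !(PySem.Set.contains us x.1)) h]
      simp only [pvA_pred, if_pos h]
    · rw [List.find?_cons_of_neg (p := fun (x : String × String × String) => x.2.1 == deja && !(PySem.Set.contains us x.1)) (by simpa using h)]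
      simp only [pvA_pred, if_neg h]
      exact ih acc us

-- one-step unfoldings of B's while loop
theorem pvB_dep_none (deja recibe : String) (acc : List (String × String × String))
    (us : PySem.Set String) (d d1 : PySem.Dict String (List (String × String × String)))
    (h : pvB_tomar d us recibe = (none, d1)) :
    pvB_dep deja recibe acc us d = (acc, us, d1) := by
  rw [pvB_dep]
  split
  · rename_i heq
    rw [h] at heq
    injection heq with h1 h2
    rw [h2]
  · rename_i heq
    rw [h] at heq
    injection heq with h1 h2
    exact absurd h1 (by simp)

theorem pvB_dep_some_none (deja recibe : String) (acc : List (String × String × String))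
    (us : PySem.Set String) (j : String × String × String)
    (d d1 d2 : PySem.Dict String (List (String × String × String)))
    (h1 : pvB_tomar d us recibe = (some j, d1))
    (h2 : pvB_tomar d1 (PySem.Set.add us j.1) deja = (none, d2)) :
    pvB_dep deja recibe acc us d =
      pvB_dep deja recibe (acc ++ [j]) (PySem.Set.add us j.1) d2 := by
  rw [pvB_dep]
  split
  · rename_i heq
    rw [h1] at heq
    injection heq with ha hb
    exact absurd ha (by simp)
  · rename_i j' d1' heq
    rw [h1] at heq
    injection heq with ha hb
    injection ha with ha
    subst ha; subst hb
    split
    · rename_i heq2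
      rw [h2] at heq2
      injection heq2 with hc hd
      rw [hd]
    · rename_i heq2
      rw [h2] at heq2
      injection heq2 with hc hd
      exact absurd hc (by simp)

theorem pvB_dep_some_some (deja recibe : String) (acc : List (String × String × String))
    (us : PySem.Set String) (j q : String × String × String)
    (d d1 d2 : PySem.Dict String (List (String × String × String)))
    (h1 : pvB_tomar d us recibe = (some j, d1))
    (h2 : pvB_tomar d1 (PySem.Set.add us j.1) deja = (some q, d2)) :
    pvB_dep deja recibe acc us d =
      pvB_dep deja recibe (acc ++ [j] ++ [q])
        (PySem.Set.add (PySem.Set.add us j.1) q.1) d2 := by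
  rw [pvB_dep]
  split
  · rename_i heq
    rw [h1] at heq
    injection heq with ha hb
    exact absurd ha (by simp)
  · rename_i j' d1' heq
    rw [h1] at heq
    injection heq with ha hb
    injection ha with ha
    subst ha; subst hb
    split
    · rename_i heq2
      rw [h2] at heq2
      injection heq2 with hc hd
      exact absurd hc (by simp)
    · rename_i q' d2' heq2
      rw [h2] at heq2
      injection heq2 with hc hd
      injection hc with hc
      subst hc; subst hd
      rfl

-- A's scan over the group for one dependency = B's while loop over the queues
theorem pvA_scan_eq (odate deja recibe : String) (g : List (String × String × String))
    (hod : ∀ e ∈ g, e.2.2 = odate) :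
    ∀ (r pr acc : List (String × String × String)) (us : PySem.Set String)
      (d : PySem.Dict String (List (String × String × String))),
    g = pr ++ r →
    (∀ e ∈ pr, (e.2.1 == recibe) = true → PySem.Set.contains us e.1 = true) →
    pvINV g us d →
    pvA_scan g odate deja recibe r acc us =
      ((pvB_dep deja recibe acc us d).1, (pvB_dep deja recibe acc us d).2.1) ∧
    pvINV g (pvB_dep deja recibe acc us d).2.1 (pvB_dep deja recibe acc us d).2.2 ∧
    pvSub us (pvB_dep deja recibe acc us d).2.1 := by
  intro r
  induction r with
  | nil =>
    intro pr acc us d hg hpr hinv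
    have hfind : g.find? (fun e => e.2.1 == recibe && !(PySem.Set.contains us e.1)) = none := by
      rw [List.find?_eq_none]
      intro x hx hc
      rw [Bool.and_eq_true] at hc
      have := hpr x (by rwa [hg, List.append_nil] at hx) hc.1
      rw [this] at hc
      simp at hc
    obtain ⟨ht1, ht2⟩ := pvB_tomar_spec g us d recibe hinv
    rcases htom : pvB_tomar d us recibe with ⟨t1, d1⟩
    rw [htom] at ht1 ht2
    simp only at ht1 ht2
    rw [hfind] at ht1
    subst ht1
    rw [pvB_dep_none deja recibe acc us d d1 htom]
    refine ⟨rfl, ?_, pvSub_refl us⟩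
    exact ht2 us (pvSub_refl us) (by intro e he; cases he)
  | cons e rest ih =>
    intro pr acc us d hg hpr hinv
    have hodE : (e.2.2 == odate) = true := by
      have := hod e (by rw [hg]; simp)
      simp [this]
    by_cases hc : (e.2.1 == recibe && !(PySem.Set.contains us e.1)) = true
    · have hfind : g.find? (fun x => x.2.1 == recibe && !(PySem.Set.contains us x.1)) = some e := by
        rw [hg, List.find?_append, List.find?_eq_none.mpr ?_, Option.none_or,
          List.find?_cons_of_pos (p := fun (x : String × String × String) => x.2.1 == recibe && !(PySem.Set.contains us x.1)) hc]
        intro x hx hxc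
        rw [Bool.and_eq_true] at hxc
        have := hpr x hx hxc.1
        rw [this] at hxc
        simp at hxc
      obtain ⟨ht1, ht2⟩ := pvB_tomar_spec g us d recibe hinv
      rcases htom : pvB_tomar d us recibe with ⟨t1, d1⟩
      rw [htom] at ht1 ht2
      simp only at ht1 ht2
      rw [hfind] at ht1
      subst ht1
      have hsub1 : pvSub us (PySem.Set.add us e.1) := pvSub_add us e.1
      have hinv1 : pvINV g (PySem.Set.add us e.1) d1 :=
        ht2 (PySem.Set.add us e.1) hsub1
          (by intro x hx; injection hx with hx; subst hx; exact pvSet_contains_add_self us _)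
      have hA : pvA_scan g odate deja recibe (e :: rest) acc us =
          pvA_scan g odate deja recibe rest
            (pvA_pred g deja (acc ++ [e]) (PySem.Set.add us e.1)).1
            (pvA_pred g deja (acc ++ [e]) (PySem.Set.add us e.1)).2 := by
        simp only [pvA_scan, hodE, Bool.and_true, if_pos hc]
      obtain ⟨hs1, hs2⟩ := pvB_tomar_spec g (PySem.Set.add us e.1) d1 deja hinv1
      rcases htom2 : pvB_tomar d1 (PySem.Set.add us e.1) deja with ⟨t2, d2⟩
      rw [htom2] at hs1 hs2
      simp only at hs1 hs2
      cases t2 with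
      | none =>
        have hpred : pvA_pred g deja (acc ++ [e]) (PySem.Set.add us e.1) =
            (acc ++ [e], PySem.Set.add us e.1) := by
          rw [pvA_pred_eq, ← hs1]
        have hinv2 : pvINV g (PySem.Set.add us e.1) d2 :=
          hs2 (PySem.Set.add us e.1) (pvSub_refl _) (by intro x hx; cases hx)
        have hB := pvB_dep_some_none deja recibe acc us e d d1 d2 htom htom2
        have hih := ih (pr ++ [e]) (acc ++ [e]) (PySem.Set.add us e.1) d2
          (by rw [hg, List.append_assoc]; rfl)
          (by
            intro x hx hxr
            rcases List.mem_append.mp hx with h | h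
            · exact hsub1 _ (hpr x h hxr)
            · rw [List.mem_singleton] at h
              subst h
              exact pvSet_contains_add_self us _)
          hinv2
        rw [hA, hpred, hB]
        exact ⟨hih.1, hih.2.1, pvSub_trans hsub1 hih.2.2⟩
      | some q =>
        have hpred : pvA_pred g deja (acc ++ [e]) (PySem.Set.add us e.1) =
            (acc ++ [e] ++ [q], PySem.Set.add (PySem.Set.add us e.1) q.1) := by
          rw [pvA_pred_eq, ← hs1]
        have hsub2 : pvSub (PySem.Set.add us e.1) (PySem.Set.add (PySem.Set.add us e.1) q.1) :=
          pvSub_add _ q.1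
        have hinv2 : pvINV g (PySem.Set.add (PySem.Set.add us e.1) q.1) d2 :=
          hs2 _ hsub2
            (by intro x hx; injection hx with hx; subst hx; exact pvSet_contains_add_self _ _)
        have hB := pvB_dep_some_some deja recibe acc us e q d d1 d2 htom htom2
        have hih := ih (pr ++ [e]) (acc ++ [e] ++ [q])
          (PySem.Set.add (PySem.Set.add us e.1) q.1) d2
          (by rw [hg, List.append_assoc]; rfl)
          (by
            intro x hx hxr
            rcases List.mem_append.mp hx with h | h
            · exact hsub2 _ (hsub1 _ (hpr x h hxr))
            · rw [List.mem_singleton] at h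
              subst h
              exact hsub2 _ (pvSet_contains_add_self us _))
          hinv2
        rw [hA, hpred, hB]
        exact ⟨hih.1, hih.2.1, pvSub_trans hsub1 (pvSub_trans hsub2 hih.2.2)⟩
    · have hA : pvA_scan g odate deja recibe (e :: rest) acc us =
          pvA_scan g odate deja recibe rest acc us := by
        simp only [pvA_scan, hodE, Bool.and_true, if_neg hc]
      rw [hA]
      apply ih (pr ++ [e]) acc us d
        (by rw [hg, List.append_assoc]; rfl)
        (by
          intro x hx hxr
          rcases List.mem_append.mp hx with h | h
          · exact hpr x h hxr
          · rw [List.mem_singleton] at h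
            subst h
            by_cases hu : PySem.Set.contains us x.1 = true
            · exact hu
            · exfalso
              apply hc
              rw [Bool.and_eq_true]
              refine ⟨hxr, ?_⟩
              rw [Bool.not_eq_true] at hu
              rw [hu]
              rfl)
        hinv

-- the fold over all dependencies of one ODATE group
theorem pvDeps_eq (g : List (String × String × String)) (odate : String)
    (hod : ∀ e ∈ g, e.2.2 = odate) :
    ∀ (deps : List (String × String)) (acc : List (String × String × String))
      (us : PySem.Set String) (d : PySem.Dict String (List (String × String × String))),
    pvINV g us d →
    deps.foldl (fun st dep => pvA_scan g odate dep.1 dep.2 g st.1 st.2) (acc, us) =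
      ((deps.foldl (fun s dep => pvB_dep dep.1 dep.2 s.1 s.2.1 s.2.2) (acc, us, d)).1,
       (deps.foldl (fun s dep => pvB_dep dep.1 dep.2 s.1 s.2.1 s.2.2) (acc, us, d)).2.1) := by
  intro deps
  induction deps with
  | nil => intro acc us d _; rfl
  | cons dep deps ih =>
    intro acc us d hinv
    obtain ⟨h1, h2, _⟩ := pvA_scan_eq odate dep.1 dep.2 g hod g [] acc us d
      (by simp) (by simp) hinv
    simp only [List.foldl_cons]
    rw [h1]
    have := ih (pvB_dep dep.1 dep.2 acc us d).1 (pvB_dep dep.1 dep.2 acc us d).2.1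
      (pvB_dep dep.1 dep.2 acc us d).2.2 h2
    simpa using this

-- the two grouping folds build the same dictionary
theorem pvAB_group_eq : pvA_group = pvB_group := rfl

-- contents of the grouping dictionary
theorem pvGroup_getD (jobs : List (String × String × String)) (o : String) :
    (pvB_group jobs).getD o [] = jobs.filter (fun e => e.2.2 == o) := by
  unfold pvB_group
  have hmap : jobs.foldl (fun d e => d.modify e.2.2 [] (fun l => l ++ [e])) PySem.Dict.empty
      = (jobs.map (fun e => (e.2.2, e))).foldl
          (fun d p => d.modify p.1 [] (fun l => l ++ [p.2])) PySem.Dict.empty := by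
    rw [List.foldl_map]
  rw [hmap, PySem.Dict.getD_foldl_modify_append]
  rw [List.filter_map]
  simp [Function.comp_def]

-- contents of the per-original index of one group
theorem pvIndex_getD (g : List (String × String × String)) (o : String) :
    (pvB_index g).getD o [] = g.filter (fun e => e.2.1 == o) := by
  unfold pvB_index
  have hmap : g.foldl (fun d e => d.modify e.2.1 [] (fun l => l ++ [e])) PySem.Dict.empty
      = (g.map (fun e => (e.2.1, e))).foldl
          (fun d p => d.modify p.1 [] (fun l => l ++ [p.2])) PySem.Dict.empty := by
    rw [List.foldl_map]
  rw [hmap, PySem.Dict.getD_foldl_modify_append]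
  rw [List.filter_map]
  simp [Function.comp_def]

theorem pvINV_init (g : List (String × String × String)) (us : PySem.Set String) :
    pvINV g us (pvB_index g) := by
  intro o
  exact ⟨[], by rw [pvIndex_getD]; rfl, by intro e he; cases he⟩

theorem pvGroup_nodup (jobs : List (String × String × String)) :
    (pvB_group jobs).keys.Nodup := by
  unfold pvB_group
  exact PySem.Dict.nodup_keys_foldl_modify_key jobs (fun e => e.2.2) []
    (fun _ e => fun l => l ++ [e]) PySem.Dict.empty PySem.Dict.nodup_keys_empty

-- iterating sorted(d) = iterating the keys of sorted(d.items())
theorem pvSortedKeys (dct : PySem.Dict String (List (String × String × String)))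
    (hnd : dct.keys.Nodup) :
    PySem.List.sorted dct.keys (fun k => k) false
      = (PySem.List.sorted dct.items (fun p => p.1) false).map (fun p => p.1) := by
  have hperm : ((PySem.List.sorted dct.items (fun p => p.1) false).map (fun p => p.1)).Perm
      dct.keys := by
    have hp : (PySem.List.sorted dct.items (fun p => p.1) false).Perm dct.items :=
      PySem.List.sorted_perm dct.items (fun p => p.1) false
    have := hp.map (fun p => p.1)
    simpa [PySem.Dict.keys] using this
  refine PySem.List.sorted_eq_of_perm_of_pairwise_lt _ _ _ hperm ?_
  have h1 : (PySem.List.sorted dct.items (fun p => p.1) false).Pairwise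
      (fun a b => a.1 ≤ b.1) :=
    PySem.List.sorted_pairwise dct.items (fun p => p.1)
  have h2 : ((PySem.List.sorted dct.items (fun p => p.1) false).map (fun p => p.1)).Pairwise
      (fun a b => a ≤ b) := List.pairwise_map.mpr h1
  have hnd2 : ((PySem.List.sorted dct.items (fun p => p.1) false).map (fun p => p.1)).Nodup :=
    (hperm.nodup_iff).mpr hnd
  exact (h2.and hnd2).imp (fun h => lt_of_le_of_ne h.1 h.2)

-- the fold over the sorted ODATEs
theorem pvFold_eq (deps : List (String × String))
    (grupos : PySem.Dict String (List (String × String × String))) :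
    ∀ (its : List (String × List (String × String × String)))
      (st : List (String × String × String) × PySem.Set String),
    (∀ it ∈ its, grupos.getD it.1 [] = it.2 ∧ ∀ e ∈ it.2, e.2.2 = it.1) →
    its.foldl (fun st item =>
        deps.foldl (fun st dep => pvA_scan item.2 item.1 dep.1 dep.2 item.2 st.1 st.2) st) st
      = its.foldl (fun st p =>
          ((deps.foldl (fun s dep => pvB_dep dep.1 dep.2 s.1 s.2.1 s.2.2)
              (st.1, st.2, pvB_index (grupos.getD p.1 []))).1,
           (deps.foldl (fun s dep => pvB_dep dep.1 dep.2 s.1 s.2.1 s.2.2)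
              (st.1, st.2, pvB_index (grupos.getD p.1 []))).2.1)) st := by
  intro its
  induction its with
  | nil => intro st _; rfl
  | cons it its ih =>
    intro st h
    obtain ⟨hg, hcont⟩ := h it (List.mem_cons_self ..)
    simp only [List.foldl_cons]
    rw [hg]
    have hstep := pvDeps_eq it.2 it.1 hcont deps st.1 st.2 (pvB_index it.2)
      (pvINV_init it.2 st.2)
    rw [show (st.1, st.2) = st from rfl] at hstep
    rw [hstep]
    exact ih _ (fun x hx => h x (List.mem_cons_of_mem _ hx))

-- ===== VERDICT (by name: the statement is the Claim_ definition above) =====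
theorem ordenar_jobs_creados_por_dependencias_spec : Claim_equal_ordenar_jobs_creados_por_dependencias := by
  intro deps jobs _
  unfold Spec_ordenar_jobs_creados_por_dependencias
  unfold ordenar_jobs_creados_por_dependencias ordenar_jobs_creados_por_dependencias_alt
  rw [pvAB_group_eq]
  dsimp only
  rw [pvSortedKeys (pvB_group jobs) (pvGroup_nodup jobs), List.foldl_map]
  rw [pvFold_eq deps (pvB_group jobs)
    (PySem.List.sorted (pvB_group jobs).items (fun p => p.1) false) ([], PySem.Set.empty) ?_]
  intro it hit
  have hmem : it ∈ (pvB_group jobs).items :=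
    (PySem.List.mem_sorted _ _ _ _).mp hit
  have hget : (pvB_group jobs).getD it.1 [] = it.2 :=
    PySem.Dict.getD_of_mem_items _ (by simpa using hmem) (pvGroup_nodup jobs) []
  refine ⟨hget, ?_⟩
  intro e he
  rw [← hget, pvGroup_getD] at he
  have := List.of_mem_filter he
  simpa using this
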